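-- pv_equiv track=rewrite | github.com/Y-Archana12/Dream-Vacation-Planner | app.py | generate_itinerary
-- ===== SOURCE A (Python) =====
-- def generate_itinerary(city, places, weather_data=None):
--     """Generate a location-specific itinerary based on tourist places"""
--     if not places:
--         return {
--             "Day 1": ["Morning: City Center Exploration", "Afternoon: Local Museums", "Evening: Local Cuisine"],
--             "Day 2": ["Morning: City Walking Tour", "Afternoon: Shopping Areas", "Evening: Cultural Show"],
--             "Day 3": ["Morning: Remaining Attractions", "Afternoon: Local Markets", "Evening: Farewell Dinner"]
--         }
--
--     # Categorize places by type
--     museums = [p for p in places if any(word in p['name'].lower() for word in ['museum', 'gallery', 'art', 'exhibition'])]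
--     landmarks = [p for p in places if any(word in p['name'].lower() for word in ['tower', 'monument', 'palace', 'castle', 'temple', 'church', 'cathedral'])]
--     parks = [p for p in places if any(word in p['name'].lower() for word in ['park', 'garden', 'botanical', 'zoo'])]
--     markets = [p for p in places if any(word in p['name'].lower() for word in ['market', 'mall', 'shopping', 'bazaar'])]
--
--     # If categorization fails, use the first few places
--     if not museums: museums = [p for p in places if p not in landmarks + parks + markets][:1]
--     if not landmarks: landmarks = [p for p in places if p not in museums + parks + markets][:1]
--     if not parks: parks = [p for p in places if p not in museums + landmarks + markets][:1]
--     if not markets: markets = [p for p in places if p not in museums + landmarks + parks][:1]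
--
--     # Generate day-by-day itinerary
--     itinerary = {
--         "Day 1": [
--             f"Morning: Visit {landmarks[0]['name']} - {landmarks[0].get('formatted_address', 'Famous landmark')}",
--             f"Afternoon: Explore {museums[0]['name']} - {museums[0].get('formatted_address', 'Cultural site')}",
--             f"Evening: Dinner at a highly-rated local restaurant near {landmarks[0]['name']}"
--         ],
--         "Day 2": [
--             f"Morning: Guided tour of {landmarks[1]['name'] if len(landmarks) > 1 else landmarks[0]['name']}",
--             f"Afternoon: Relax at {parks[0]['name']} - {parks[0].get('formatted_address', 'Beautiful park')}",
--             "Evening: Experience local nightlife or cultural show"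
--         ],
--         "Day 3": [
--             f"Morning: Visit {museums[1]['name'] if len(museums) > 1 else museums[0]['name']}",
--             f"Afternoon: Shopping at {markets[0]['name']} - {markets[0].get('formatted_address', 'Shopping area')}",
--             "Evening: Farewell dinner with local specialties"
--         ]
--     }
--
--     # Add travel tips
--     itinerary["Travel Tips"] = [
--         "Book popular attractions in advance",
--         "Use public transportation to save money",
--         "Try local cuisine at recommended restaurants",
--         "Keep emergency contact numbers handy",
--         "Carry a city map or use offline maps"
--     ]
--
--     return itinerary
-- ===== SOURCE B (Python) =====
-- _CATEGORY_KEYWORDS = [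
--     ('museum', 'gallery', 'art', 'exhibition'),
--     ('tower', 'monument', 'palace', 'castle', 'temple', 'church', 'cathedral'),
--     ('park', 'garden', 'botanical', 'zoo'),
--     ('market', 'mall', 'shopping', 'bazaar'),
-- ]
--
--
-- def _build_itinerary(museums, landmarks, parks, markets):
--     day2_lm = landmarks[1] if len(landmarks) > 1 else landmarks[0]
--     day3_mu = museums[1] if len(museums) > 1 else museums[0]
--     return {
--         "Day 1": [
--             f"Morning: Visit {landmarks[0]['name']} - {landmarks[0].get('formatted_address', 'Famous landmark')}",
--             f"Afternoon: Explore {museums[0]['name']} - {museums[0].get('formatted_address', 'Cultural site')}",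
--             f"Evening: Dinner at a highly-rated local restaurant near {landmarks[0]['name']}",
--         ],
--         "Day 2": [
--             f"Morning: Guided tour of {day2_lm['name']}",
--             f"Afternoon: Relax at {parks[0]['name']} - {parks[0].get('formatted_address', 'Beautiful park')}",
--             "Evening: Experience local nightlife or cultural show",
--         ],
--         "Day 3": [
--             f"Morning: Visit {day3_mu['name']}",
--             f"Afternoon: Shopping at {markets[0]['name']} - {markets[0].get('formatted_address', 'Shopping area')}",
--             "Evening: Farewell dinner with local specialties",
--         ],
--         "Travel Tips": [
--             "Book popular attractions in advance",
--             "Use public transportation to save money",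
--             "Try local cuisine at recommended restaurants",
--             "Keep emergency contact numbers handy",
--             "Carry a city map or use offline maps",
--         ],
--     }
--
--
-- def generate_itinerary(city, places, weather_data=None):
--     """Generate a location-specific itinerary based on tourist places"""
--     if not places:
--         return {
--             "Day 1": ["Morning: City Center Exploration", "Afternoon: Local Museums", "Evening: Local Cuisine"],
--             "Day 2": ["Morning: City Walking Tour", "Afternoon: Shopping Areas", "Evening: Cultural Show"],
--             "Day 3": ["Morning: Remaining Attractions", "Afternoon: Local Markets", "Evening: Farewell Dinner"]
--         }
--
--     # One pass: sort every place into each category whose keyword occurs in its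
--     # name; places matching no category are kept aside as fillers.
--     buckets = [[], [], [], []]
--     fillers = []
--     for p in places:
--         name = p['name'].lower()
--         matched = False
--         for bucket, keywords in zip(buckets, _CATEGORY_KEYWORDS):
--             if any(word in name for word in keywords):
--                 bucket.append(p)
--                 matched = True
--         if not matched:
--             fillers.append(p)
--
--     # Empty categories each borrow the first filler place not already borrowed.
--     used = []
--     for i, bucket in enumerate(buckets):
--         if not bucket:
--             pick = next((q for q in fillers if q not in used), None)
--             if pick is None:
--                 buckets[i] = []
--             else:
--                 buckets[i] = [pick]
--                 used.append(pick)
--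
--     return _build_itinerary(*buckets)
-- ===== Notes on version B (the rewrite author's own statement) =====
-- stated objective: alternative
-- what changed: B replaces A's four separate full-list comprehensions plus the ad-hoc 'p not in X+Y+Z' re-scans by a single pass that drops each place into every matching category bucket while collecting keyword-free places as fillers, and then fills each empty category with the first filler not already used.
import Mathlib
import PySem

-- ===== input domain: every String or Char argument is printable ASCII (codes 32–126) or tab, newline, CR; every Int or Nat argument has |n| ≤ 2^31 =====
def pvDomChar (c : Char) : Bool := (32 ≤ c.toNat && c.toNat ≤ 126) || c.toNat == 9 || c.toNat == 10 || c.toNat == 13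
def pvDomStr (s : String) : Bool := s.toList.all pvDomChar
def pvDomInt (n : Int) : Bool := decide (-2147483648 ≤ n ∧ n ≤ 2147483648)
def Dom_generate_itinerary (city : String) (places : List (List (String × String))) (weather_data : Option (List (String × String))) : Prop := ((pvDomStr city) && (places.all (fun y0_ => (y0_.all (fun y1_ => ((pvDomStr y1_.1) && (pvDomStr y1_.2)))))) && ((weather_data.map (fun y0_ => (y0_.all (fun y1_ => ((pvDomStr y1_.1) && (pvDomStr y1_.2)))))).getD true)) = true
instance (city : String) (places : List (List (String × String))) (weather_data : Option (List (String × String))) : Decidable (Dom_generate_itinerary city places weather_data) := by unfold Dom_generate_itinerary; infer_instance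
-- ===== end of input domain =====

-- B replaces A's four full-list comprehensions and fallback re-scans by ONE pass that sorts each
-- place into every matching category (collecting non-matching places as fillers) and a uniform
-- fill step that hands empty categories the first unused filler (objective: alternative decomposition).
-- NOTE: each place dict (assoc list) is decoded with PySem.Dict.ofList (Python dict build: last
-- duplicate key wins), and Python's dict == is modelled by pvDictEq (unordered key/value comparison).

-- shared small helpers (the same Python expressions occur verbatim in A and B)
def pvName (d : PySem.Dict String String) : String := (d.get? "name").getD ""  -- p['name']; get? = none is Python's KeyError, excluded by Pre_
def pvHasAny (kws : List String) (nm : String) : Bool := kws.any (fun w => PySem.Str.isIn w nm)  -- any(word in nm for word in kws)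
def pvKwMatch (kws : List String) (d : PySem.Dict String String) : Bool := pvHasAny kws (PySem.Str.lower (pvName d))
def pvDictEq (d e : PySem.Dict String String) : Bool :=  -- Python dict ==: same key set, same value at every key
  PySem.Set.equal d.keys e.keys && d.keys.all (fun k => d.get? k == e.get? k)
def museumKws : List String := ["museum", "gallery", "art", "exhibition"]
def landmarkKws : List String := ["tower", "monument", "palace", "castle", "temple", "church", "cathedral"]
def parkKws : List String := ["park", "garden", "botanical", "zoo"]
def marketKws : List String := ["market", "mall", "shopping", "bazaar"]
def pvDefaultItin : List (String × List String) :=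
  [("Day 1", ["Morning: City Center Exploration", "Afternoon: Local Museums", "Evening: Local Cuisine"]),
   ("Day 2", ["Morning: City Walking Tour", "Afternoon: Shopping Areas", "Evening: Cultural Show"]),
   ("Day 3", ["Morning: Remaining Attractions", "Afternoon: Local Markets", "Evening: Farewell Dinner"])]
def pvTips : List String :=
  ["Book popular attractions in advance", "Use public transportation to save money",
   "Try local cuisine at recommended restaurants", "Keep emergency contact numbers handy",
   "Carry a city map or use offline maps"]

-- ===== PORT A =====
def generate_itinerary (city : String) (places : List (List (String × String))) (weather_data : Option (List (String × String))) : List (String × List String) :=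
  if places.isEmpty then pvDefaultItin
  else
    let ds := places.map (fun pr => PySem.Dict.ofList pr)
    let museums0 := ds.filter (fun p => pvKwMatch museumKws p)
    let landmarks0 := ds.filter (fun p => pvKwMatch landmarkKws p)
    let parks0 := ds.filter (fun p => pvKwMatch parkKws p)
    let markets0 := ds.filter (fun p => pvKwMatch marketKws p)
    -- if not museums: museums = [p for p in places if p not in landmarks + parks + markets][:1]   (etc.)
    let museums := if museums0.isEmpty then (ds.filter (fun p => !((landmarks0 ++ parks0 ++ markets0).any (fun q => pvDictEq p q)))).take 1 else museums0
    let landmarks := if landmarks0.isEmpty then (ds.filter (fun p => !((museums ++ parks0 ++ markets0).any (fun q => pvDictEq p q)))).take 1 else landmarks0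
    let parks := if parks0.isEmpty then (ds.filter (fun p => !((museums ++ landmarks ++ markets0).any (fun q => pvDictEq p q)))).take 1 else parks0
    let markets := if markets0.isEmpty then (ds.filter (fun p => !((museums ++ landmarks ++ parks).any (fun q => pvDictEq p q)))).take 1 else markets0
    -- indexing [0]/[1]: an empty category is Python's IndexError, excluded by Pre_ (default never used inside Pre_)
    let l0 := PySem.List.pyGetD landmarks 0 PySem.Dict.empty
    let m0 := PySem.List.pyGetD museums 0 PySem.Dict.empty
    let p0 := PySem.List.pyGetD parks 0 PySem.Dict.empty
    let k0 := PySem.List.pyGetD markets 0 PySem.Dict.empty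
    let l1 := if 1 < landmarks.length then PySem.List.pyGetD landmarks 1 PySem.Dict.empty else l0
    let m1 := if 1 < museums.length then PySem.List.pyGetD museums 1 PySem.Dict.empty else m0
    [("Day 1",
      ["Morning: Visit " ++ pvName l0 ++ " - " ++ l0.getD "formatted_address" "Famous landmark",
       "Afternoon: Explore " ++ pvName m0 ++ " - " ++ m0.getD "formatted_address" "Cultural site",
       "Evening: Dinner at a highly-rated local restaurant near " ++ pvName l0]),
     ("Day 2",
      ["Morning: Guided tour of " ++ pvName l1,
       "Afternoon: Relax at " ++ pvName p0 ++ " - " ++ p0.getD "formatted_address" "Beautiful park",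
       "Evening: Experience local nightlife or cultural show"]),
     ("Day 3",
      ["Morning: Visit " ++ pvName m1,
       "Afternoon: Shopping at " ++ pvName k0 ++ " - " ++ k0.getD "formatted_address" "Shopping area",
       "Evening: Farewell dinner with local specialties"]),
     ("Travel Tips", pvTips)]

-- ===== PORT B =====
-- one pass: drop each place into every category whose keyword occurs in its (lowered) name
def pvStep (st : List (PySem.Dict String String) × List (PySem.Dict String String) × List (PySem.Dict String String) × List (PySem.Dict String String) × List (PySem.Dict String String)) (p : PySem.Dict String String) :
    List (PySem.Dict String String) × List (PySem.Dict String String) × List (PySem.Dict String String) × List (PySem.Dict String String) × List (PySem.Dict String String) :=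
  let nm := PySem.Str.lower (pvName p)
  let b1 := pvHasAny museumKws nm
  let b2 := pvHasAny landmarkKws nm
  let b3 := pvHasAny parkKws nm
  let b4 := pvHasAny marketKws nm
  (if b1 then st.1 ++ [p] else st.1,
   if b2 then st.2.1 ++ [p] else st.2.1,
   if b3 then st.2.2.1 ++ [p] else st.2.2.1,
   if b4 then st.2.2.2.1 ++ [p] else st.2.2.2.1,
   if b1 || b2 || b3 || b4 then st.2.2.2.2 else st.2.2.2.2 ++ [p])

-- loop body of the fill loop: an empty bucket borrows the first filler not already borrowed
def pvFillOne (bucket fillers used : List (PySem.Dict String String)) :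
    List (PySem.Dict String String) × List (PySem.Dict String String) :=
  if bucket.isEmpty then
    match fillers.find? (fun q => !(used.any (fun u => pvDictEq q u))) with
    | some q => ([q], used ++ [q])
    | none => ([], used)
  else (bucket, used)

def pvBuildItinerary (museums landmarks parks markets : List (PySem.Dict String String)) : List (String × List String) :=
  let l0 := PySem.List.pyGetD landmarks 0 PySem.Dict.empty
  let m0 := PySem.List.pyGetD museums 0 PySem.Dict.empty
  let p0 := PySem.List.pyGetD parks 0 PySem.Dict.empty
  let k0 := PySem.List.pyGetD markets 0 PySem.Dict.empty
  let l1 := if 1 < landmarks.length then PySem.List.pyGetD landmarks 1 PySem.Dict.empty else l0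
  let m1 := if 1 < museums.length then PySem.List.pyGetD museums 1 PySem.Dict.empty else m0
  [("Day 1",
    ["Morning: Visit " ++ pvName l0 ++ " - " ++ l0.getD "formatted_address" "Famous landmark",
     "Afternoon: Explore " ++ pvName m0 ++ " - " ++ m0.getD "formatted_address" "Cultural site",
     "Evening: Dinner at a highly-rated local restaurant near " ++ pvName l0]),
   ("Day 2",
    ["Morning: Guided tour of " ++ pvName l1,
     "Afternoon: Relax at " ++ pvName p0 ++ " - " ++ p0.getD "formatted_address" "Beautiful park",
     "Evening: Experience local nightlife or cultural show"]),
   ("Day 3",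
    ["Morning: Visit " ++ pvName m1,
     "Afternoon: Shopping at " ++ pvName k0 ++ " - " ++ k0.getD "formatted_address" "Shopping area",
     "Evening: Farewell dinner with local specialties"]),
   ("Travel Tips", pvTips)]

def generate_itinerary_alt (city : String) (places : List (List (String × String))) (weather_data : Option (List (String × String))) : List (String × List String) :=
  if places.isEmpty then pvDefaultItin
  else
    let ds := places.map (fun pr => PySem.Dict.ofList pr)
    let st := ds.foldl pvStep ([], [], [], [], [])
    let fillers := st.2.2.2.2
    let (ms, u1) := pvFillOne st.1 fillers []
    let (ls, u2) := pvFillOne st.2.1 fillers u1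
    let (ps, u3) := pvFillOne st.2.2.1 fillers u2
    let (ks, _) := pvFillOne st.2.2.2.1 fillers u3
    pvBuildItinerary ms ls ps ks

-- ===== PRECONDITION & SPEC =====
def pvIsNeutral (d : PySem.Dict String String) : Bool :=
  !(pvKwMatch museumKws d || pvKwMatch landmarkKws d || pvKwMatch parkKws d || pvKwMatch marketKws d)
-- number of categories no place matches
def pvEmptyCats (ds : List (PySem.Dict String String)) : Nat :=
  (([museumKws, landmarkKws, parkKws, marketKws]).filter (fun kws => !(ds.any (fun p => pvKwMatch kws p)))).length
-- distinct (under Python dict ==) places matching no category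
def pvDistinctNeutrals (ds : List (PySem.Dict String String)) : List (PySem.Dict String String) :=
  ds.foldl (fun acc d => if pvIsNeutral d && !(acc.any (fun u => pvDictEq d u)) then acc ++ [d] else acc) []
-- Pre_ excludes exactly the inputs where the Python A raises: a place without a 'name' key
-- (KeyError), or fewer distinct keyword-free places than empty categories (IndexError).
def Pre_generate_itinerary (city : String) (places : List (List (String × String))) (weather_data : Option (List (String × String))) : Prop :=
  places = [] ∨
    ((∀ pr ∈ places, (PySem.Dict.ofList pr).contains "name" = true) ∧
     pvEmptyCats (places.map (fun pr => PySem.Dict.ofList pr)) ≤ (pvDistinctNeutrals (places.map (fun pr => PySem.Dict.ofList pr))).length)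
instance (city : String) (places : List (List (String × String))) (weather_data : Option (List (String × String))) : Decidable (Pre_generate_itinerary city places weather_data) := by unfold Pre_generate_itinerary; infer_instance

def pvWitness_generate_itinerary : String × (List (List (String × String))) × (Option (List (String × String))) :=
  ("Paris", [[("name", "foo")], [("name", "bar")], [("name", "baz")], [("name", "qux")]], none)

def Spec_generate_itinerary (city : String) (places : List (List (String × String))) (weather_data : Option (List (String × String))) (out : List (String × List String)) : Prop := out = generate_itinerary_alt city places weather_data
instance (city : String) (places : List (List (String × String))) (weather_data : Option (List (String × String))) (out : List (String × List String)) : Decidable (Spec_generate_itinerary city places weather_data out) := by unfold Spec_generate_itinerary; infer_instance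

-- ===== CLAIM (what is proved, stated in full; the proofs are below) =====
def Claim_equal_generate_itinerary : Prop := ∀ (city : String) (places : List (List (String × String))) (weather_data : Option (List (String × String))), Dom_generate_itinerary city places weather_data → Pre_generate_itinerary city places weather_data → Spec_generate_itinerary city places weather_data (generate_itinerary city places weather_data)

-- ===== LEMMAS AND PROOFS =====

lemma pvDictEq_get? {d e : PySem.Dict String String} (h : pvDictEq d e = true) (k : String) :
    d.get? k = e.get? k := by
  unfold pvDictEq at h
  rw [Bool.and_eq_true] at h
  obtain ⟨hk, hv⟩ := h
  rw [PySem.Set.equal_iff] at hk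
  by_cases hm : k ∈ d.keys
  · exact eq_of_beq (List.all_eq_true.mp hv k hm)
  · have h1 : d.get? k = none := (PySem.Dict.get?_eq_none_iff_not_mem_keys d k).mpr hm
    have h2 : e.get? k = none :=
      (PySem.Dict.get?_eq_none_iff_not_mem_keys e k).mpr (fun hc => hm ((hk k).mpr hc))
    rw [h1, h2]

lemma pvDictEq_kwMatch {d e : PySem.Dict String String} (kws : List String)
    (h : pvDictEq d e = true) : pvKwMatch kws d = pvKwMatch kws e := by
  unfold pvKwMatch pvName
  rw [pvDictEq_get? h]

lemma pvDictEq_refl (d : PySem.Dict String String) : pvDictEq d d = true := by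
  unfold pvDictEq
  rw [Bool.and_eq_true]
  exact ⟨(PySem.Set.equal_iff _ _).mpr (fun _ => Iff.rfl),
         List.all_eq_true.mpr (fun _ _ => beq_self_eq_true _)⟩

-- xs[:1] of a filter is the first hit of find?
lemma pv_take_one {α : Type} (xs : List α) (p : α → Bool) :
    (xs.filter p).take 1 = (xs.find? p).toList := by
  induction xs with
  | nil => rfl
  | cons a t ih => by_cases h : p a <;> simp [h, ih]

lemma pv_match_false_of_filter_nil {ds : List (PySem.Dict String String)} {kws : List String}
    {p : PySem.Dict String String}
    (hnil : ds.filter (fun q => pvKwMatch kws q) = []) (hp : p ∈ ds) :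
    pvKwMatch kws p = false := by
  by_contra hc
  have hmem : p ∈ ds.filter (fun q => pvKwMatch kws q) :=
    List.mem_filter.mpr ⟨hp, by simpa using hc⟩
  simp [hnil] at hmem

lemma pv_any_filter_false {ds : List (PySem.Dict String String)} {kws : List String}
    {p : PySem.Dict String String} (h : pvKwMatch kws p = false) :
    (ds.filter (fun q => pvKwMatch kws q)).any (fun q => pvDictEq p q) = false := by
  simp only [List.any_eq_false]
  intro q hq
  rw [List.mem_filter] at hq
  intro hc
  rw [pvDictEq_kwMatch kws hc, hq.2] at h
  exact Bool.true_eq_false.mp h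

lemma pv_any_filter_self {ds : List (PySem.Dict String String)} {kws : List String}
    {p : PySem.Dict String String} (hp : p ∈ ds) (h : pvKwMatch kws p = true) :
    (ds.filter (fun q => pvKwMatch kws q)).any (fun q => pvDictEq p q) = true :=
  List.any_eq_true.mpr ⟨p, List.mem_filter.mpr ⟨hp, h⟩, pvDictEq_refl p⟩

lemma pv_neutral_false {p : PySem.Dict String String} (h : pvIsNeutral p = true) :
    pvKwMatch museumKws p = false ∧ pvKwMatch landmarkKws p = false ∧
    pvKwMatch parkKws p = false ∧ pvKwMatch marketKws p = false := by
  simp only [pvIsNeutral, Bool.not_eq_true', Bool.or_eq_false_iff] at h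
  exact ⟨h.1.1.1, h.1.1.2, h.1.2, h.2⟩

lemma pv_nonneutral_or {p : PySem.Dict String String} (h : pvIsNeutral p = false) :
    pvKwMatch museumKws p = true ∨ pvKwMatch landmarkKws p = true ∨
    pvKwMatch parkKws p = true ∨ pvKwMatch marketKws p = true := by
  simp only [pvIsNeutral, Bool.not_eq_false', Bool.or_eq_true_iff] at h
  obtain ((a | b) | c) | d := h
  exacts [Or.inl a, Or.inr (Or.inl b), Or.inr (Or.inr (Or.inl c)), Or.inr (Or.inr (Or.inr d))]

-- description of one list in A's fallback concatenation: either the untouched category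
-- filter (contributing no borrowed filler), or a borrowed-filler list replacing an empty filter
def pvPart (ds x : List (PySem.Dict String String)) (kws : List String)
    (pl : List (PySem.Dict String String)) : Prop :=
  (x = ds.filter (fun q => pvKwMatch kws q) ∧ pl = []) ∨
  (ds.filter (fun q => pvKwMatch kws q) = [] ∧ x = pl ∧ ∀ u ∈ pl, pvIsNeutral u = true)

lemma pvPart_neutral {ds x pl : List (PySem.Dict String String)} {kws : List String}
    {p : PySem.Dict String String} (h : pvPart ds x kws pl) (hn : pvKwMatch kws p = false) :
    x.any (fun q => pvDictEq p q) = pl.any (fun u => pvDictEq p u) := by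
  rcases h with ⟨hx, hpl⟩ | ⟨_, hx, _⟩
  · rw [hx, hpl, pv_any_filter_false hn]; rfl
  · rw [hx]

lemma pvPart_nonneutral {ds x pl : List (PySem.Dict String String)} {kws : List String}
    {p : PySem.Dict String String} (h : pvPart ds x kws pl) (hp : p ∈ ds)
    (hm : pvKwMatch kws p = true) : x.any (fun q => pvDictEq p q) = true := by
  rcases h with ⟨hx, _⟩ | ⟨hnil, _, _⟩
  · rw [hx]; exact pv_any_filter_self hp hm
  · rw [pv_match_false_of_filter_nil hnil hp] at hm
    exact absurd hm (by simp)

-- A's fallback "[p for p in places if p not in X1+X2+X3][:1]" is B's "first unused filler"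
lemma pv_fallback (ds x1 x2 x3 pl1 pl2 pl3 used : List (PySem.Dict String String))
    (kws1 kws2 kws3 : List String)
    (h1 : pvPart ds x1 kws1 pl1) (h2 : pvPart ds x2 kws2 pl2) (h3 : pvPart ds x3 kws3 pl3)
    (hkn1 : ∀ p, pvIsNeutral p = true → pvKwMatch kws1 p = false)
    (hkn2 : ∀ p, pvIsNeutral p = true → pvKwMatch kws2 p = false)
    (hkn3 : ∀ p, pvIsNeutral p = true → pvKwMatch kws3 p = false)
    (hu : ∀ p, used.any (fun u => pvDictEq p u) = (pl1 ++ (pl2 ++ pl3)).any (fun u => pvDictEq p u))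
    (hnon : ∀ p ∈ ds, pvIsNeutral p = false →
      pvKwMatch kws1 p = true ∨ pvKwMatch kws2 p = true ∨ pvKwMatch kws3 p = true) :
    (ds.filter (fun p => !((x1 ++ x2 ++ x3).any (fun q => pvDictEq p q)))).take 1
      = ((ds.filter (fun p => pvIsNeutral p)).find?
          (fun q => !(used.any (fun u => pvDictEq q u)))).toList := by
  have hfe : ds.filter (fun p => !((x1 ++ x2 ++ x3).any (fun q => pvDictEq p q)))
      = (ds.filter (fun p => pvIsNeutral p)).filter
          (fun q => !(used.any (fun u => pvDictEq q u))) := by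
    rw [List.filter_filter]
    apply List.filter_congr
    intro p hp
    by_cases hn : pvIsNeutral p = true
    · have e1 := pvPart_neutral h1 (hkn1 p hn)
      have e2 := pvPart_neutral h2 (hkn2 p hn)
      have e3 := pvPart_neutral h3 (hkn3 p hn)
      simp [List.any_append, e1, e2, e3, hn, hu p]
    · rw [Bool.not_eq_true] at hn
      rcases hnon p hp hn with hm | hm | hm
      · simp [List.any_append, pvPart_nonneutral h1 hp hm, hn]
      · simp [List.any_append, pvPart_nonneutral h2 hp hm, hn]
      · simp [List.any_append, pvPart_nonneutral h3 hp hm, hn]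
  rw [hfe, pv_take_one]

lemma pvFillOne_empty (fillers used : List (PySem.Dict String String)) :
    pvFillOne [] fillers used =
      ((fillers.find? (fun q => !(used.any (fun u => pvDictEq q u)))).toList,
       used ++ (fillers.find? (fun q => !(used.any (fun u => pvDictEq q u)))).toList) := by
  unfold pvFillOne
  cases h : fillers.find? (fun q => !(used.any (fun u => pvDictEq q u))) <;> simp [h]


lemma pvFillOne_nonempty {bucket : List (PySem.Dict String String)}
    (h : bucket.isEmpty = false) (fillers used : List (PySem.Dict String String)) :
    pvFillOne bucket fillers used = (bucket, used) := by
  unfold pvFillOne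
  simp [h]

lemma pv_neutral_of_toList {N : List (PySem.Dict String String)}
    {pr : PySem.Dict String String → Bool}
    (hN : ∀ q ∈ N, pvIsNeutral q = true) :
    ∀ u ∈ (N.find? pr).toList, pvIsNeutral u = true := by
  intro u hu
  cases h : N.find? pr with
  | none => rw [h] at hu; simp at hu
  | some q =>
    rw [h] at hu
    simp only [Option.toList_some, List.mem_singleton] at hu
    subst hu
    exact hN _ (List.mem_of_find?_eq_some h)

-- the borrowed filler (as a zero/one element list) for an empty bucket, given the already-borrowed ones
def pvPickT (N used : List (PySem.Dict String String)) : List (PySem.Dict String String) :=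
  (N.find? (fun q => !(used.any (fun u => pvDictEq q u)))).toList

lemma pv_foldl_step (ds : List (PySem.Dict String String))
    (a b c d e : List (PySem.Dict String String)) :
    ds.foldl pvStep (a, b, c, d, e) =
      (a ++ ds.filter (fun p => pvKwMatch museumKws p),
       b ++ ds.filter (fun p => pvKwMatch landmarkKws p),
       c ++ ds.filter (fun p => pvKwMatch parkKws p),
       d ++ ds.filter (fun p => pvKwMatch marketKws p),
       e ++ ds.filter (fun p => pvIsNeutral p)) := by
  induction ds generalizing a b c d e with
  | nil => simp
  | cons p t ih =>
    rw [List.foldl_cons, pvStep, ih]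
    by_cases h1 : pvHasAny museumKws (PySem.Str.lower (pvName p)) <;>
      by_cases h2 : pvHasAny landmarkKws (PySem.Str.lower (pvName p)) <;>
        by_cases h3 : pvHasAny parkKws (PySem.Str.lower (pvName p)) <;>
          by_cases h4 : pvHasAny marketKws (PySem.Str.lower (pvName p)) <;>
            simp [pvKwMatch, pvIsNeutral, h1, h2, h3, h4]

theorem pv_main : ∀ (city : String) (places : List (List (String × String))) (weather_data : Option (List (String × String))), generate_itinerary city places weather_data = generate_itinerary_alt city places weather_data := by
  intro city places weather_data
  cases places with
  | nil => rfl
  | cons pr0 rest =>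
    unfold generate_itinerary generate_itinerary_alt
    rw [if_neg (by simp), if_neg (by simp)]
    simp only [pv_foldl_step, List.nil_append]
    set ds := (pr0 :: rest).map (fun pr => PySem.Dict.ofList pr) with hds
    set M := ds.filter (fun p => pvKwMatch museumKws p) with hMdef
    set L := ds.filter (fun p => pvKwMatch landmarkKws p) with hLdef
    set P := ds.filter (fun p => pvKwMatch parkKws p) with hPdef
    set K := ds.filter (fun p => pvKwMatch marketKws p) with hKdef
    set N := ds.filter (fun p => pvIsNeutral p) with hNdef
    have hNneu : ∀ q ∈ N, pvIsNeutral q = true := by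
      intro q hq; rw [hNdef] at hq; exact (List.mem_filter.mp hq).2
    -- step 1: the museums fallback
    have hstep1 : ∃ mus plM,
        (if M.isEmpty = true then
          (ds.filter (fun p => !((L ++ P ++ K).any (fun q => pvDictEq p q)))).take 1 else M) = mus ∧
        pvFillOne M N [] = (mus, plM) ∧ pvPart ds mus museumKws plM := by
      by_cases hMe : M.isEmpty = true
      · have hMnil : M = [] := List.isEmpty_iff.mp hMe
        have hMnil' : ds.filter (fun q => pvKwMatch museumKws q) = [] := hMdef.symm.trans hMnil
        refine ⟨pvPickT N [], pvPickT N [], ?_, ?_, ?_⟩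
        · rw [if_pos hMe]
          refine pv_fallback ds L P K [] [] [] [] landmarkKws parkKws marketKws
            (Or.inl ⟨hLdef, rfl⟩) (Or.inl ⟨hPdef, rfl⟩) (Or.inl ⟨hKdef, rfl⟩)
            (fun p hn => (pv_neutral_false hn).2.1)
            (fun p hn => (pv_neutral_false hn).2.2.1)
            (fun p hn => (pv_neutral_false hn).2.2.2)
            (by intro p; simp) ?_
          intro p hp hn
          rcases pv_nonneutral_or hn with hm | hm | hm | hm
          · rw [pv_match_false_of_filter_nil hMnil' hp] at hm; exact absurd hm (by simp)
          · exact Or.inl hm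
          · exact Or.inr (Or.inl hm)
          · exact Or.inr (Or.inr hm)
        · rw [hMnil, pvFillOne_empty]
          simp [pvPickT]
        · exact Or.inr ⟨hMnil', rfl, pv_neutral_of_toList hNneu⟩
      · have hMe' : M.isEmpty = false := by simpa using hMe
        exact ⟨M, [], if_neg hMe, by rw [pvFillOne_nonempty hMe' N []], Or.inl ⟨hMdef, rfl⟩⟩
    obtain ⟨mus, plM, e1a, e1b, hp1⟩ := hstep1
    simp only [e1a, e1b]
    -- step 2: the landmarks fallback
    have hstep2 : ∃ lms plL,
        (if L.isEmpty = true then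
          (ds.filter (fun p => !((mus ++ P ++ K).any (fun q => pvDictEq p q)))).take 1 else L) = lms ∧
        pvFillOne L N plM = (lms, plM ++ plL) ∧ pvPart ds lms landmarkKws plL := by
      by_cases hLe : L.isEmpty = true
      · have hLnil : L = [] := List.isEmpty_iff.mp hLe
        have hLnil' : ds.filter (fun q => pvKwMatch landmarkKws q) = [] := hLdef.symm.trans hLnil
        refine ⟨pvPickT N plM, pvPickT N plM, ?_, ?_, ?_⟩
        · rw [if_pos hLe]
          refine pv_fallback ds mus P K plM [] [] plM museumKws parkKws marketKws
            hp1 (Or.inl ⟨hPdef, rfl⟩) (Or.inl ⟨hKdef, rfl⟩)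
            (fun p hn => (pv_neutral_false hn).1)
            (fun p hn => (pv_neutral_false hn).2.2.1)
            (fun p hn => (pv_neutral_false hn).2.2.2)
            (by intro p; simp) ?_
          intro p hp hn
          rcases pv_nonneutral_or hn with hm | hm | hm | hm
          · exact Or.inl hm
          · rw [pv_match_false_of_filter_nil hLnil' hp] at hm; exact absurd hm (by simp)
          · exact Or.inr (Or.inl hm)
          · exact Or.inr (Or.inr hm)
        · rw [hLnil, pvFillOne_empty]
          simp [pvPickT]
        · exact Or.inr ⟨hLnil', rfl, pv_neutral_of_toList hNneu⟩
      · have hLe' : L.isEmpty = false := by simpa using hLe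
        exact ⟨L, [], if_neg hLe,
          by rw [pvFillOne_nonempty hLe' N plM, List.append_nil], Or.inl ⟨hLdef, rfl⟩⟩
    obtain ⟨lms, plL, e2a, e2b, hp2⟩ := hstep2
    simp only [e2a, e2b]
    -- step 3: the parks fallback
    have hstep3 : ∃ pks plP,
        (if P.isEmpty = true then
          (ds.filter (fun p => !((mus ++ lms ++ K).any (fun q => pvDictEq p q)))).take 1 else P) = pks ∧
        pvFillOne P N (plM ++ plL) = (pks, (plM ++ plL) ++ plP) ∧ pvPart ds pks parkKws plP := by
      by_cases hPe : P.isEmpty = true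
      · have hPnil : P = [] := List.isEmpty_iff.mp hPe
        have hPnil' : ds.filter (fun q => pvKwMatch parkKws q) = [] := hPdef.symm.trans hPnil
        refine ⟨pvPickT N (plM ++ plL), pvPickT N (plM ++ plL), ?_, ?_, ?_⟩
        · rw [if_pos hPe]
          refine pv_fallback ds mus lms K plM plL [] (plM ++ plL) museumKws landmarkKws marketKws
            hp1 hp2 (Or.inl ⟨hKdef, rfl⟩)
            (fun p hn => (pv_neutral_false hn).1)
            (fun p hn => (pv_neutral_false hn).2.1)
            (fun p hn => (pv_neutral_false hn).2.2.2)
            (by intro p; simp [List.any_append]) ?_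
          intro p hp hn
          rcases pv_nonneutral_or hn with hm | hm | hm | hm
          · exact Or.inl hm
          · exact Or.inr (Or.inl hm)
          · rw [pv_match_false_of_filter_nil hPnil' hp] at hm; exact absurd hm (by simp)
          · exact Or.inr (Or.inr hm)
        · rw [hPnil, pvFillOne_empty]
          simp [pvPickT]
        · exact Or.inr ⟨hPnil', rfl, pv_neutral_of_toList hNneu⟩
      · have hPe' : P.isEmpty = false := by simpa using hPe
        exact ⟨P, [], if_neg hPe,
          by rw [pvFillOne_nonempty hPe' N (plM ++ plL), List.append_nil], Or.inl ⟨hPdef, rfl⟩⟩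
    obtain ⟨pks, plP, e3a, e3b, hp3⟩ := hstep3
    simp only [e3a, e3b]
    -- step 4: the markets fallback
    have hstep4 : ∃ mks plK,
        (if K.isEmpty = true then
          (ds.filter (fun p => !((mus ++ lms ++ pks).any (fun q => pvDictEq p q)))).take 1 else K) = mks ∧
        pvFillOne K N ((plM ++ plL) ++ plP) = (mks, ((plM ++ plL) ++ plP) ++ plK) := by
      by_cases hKe : K.isEmpty = true
      · have hKnil : K = [] := List.isEmpty_iff.mp hKe
        have hKnil' : ds.filter (fun q => pvKwMatch marketKws q) = [] := hKdef.symm.trans hKnil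
        refine ⟨pvPickT N ((plM ++ plL) ++ plP), pvPickT N ((plM ++ plL) ++ plP), ?_, ?_⟩
        · rw [if_pos hKe]
          refine pv_fallback ds mus lms pks plM plL plP ((plM ++ plL) ++ plP)
            museumKws landmarkKws parkKws hp1 hp2 hp3
            (fun p hn => (pv_neutral_false hn).1)
            (fun p hn => (pv_neutral_false hn).2.1)
            (fun p hn => (pv_neutral_false hn).2.2.1)
            (by intro p; simp [List.any_append]) ?_
          intro p hp hn
          rcases pv_nonneutral_or hn with hm | hm | hm | hm
          · exact Or.inl hm
          · exact Or.inr (Or.inl hm)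
          · exact Or.inr (Or.inr hm)
          · rw [pv_match_false_of_filter_nil hKnil' hp] at hm; exact absurd hm (by simp)
        · rw [hKnil, pvFillOne_empty]
          simp [pvPickT]
      · have hKe' : K.isEmpty = false := by simpa using hKe
        exact ⟨K, [], if_neg hKe, by
          rw [pvFillOne_nonempty hKe' N ((plM ++ plL) ++ plP), List.append_nil]⟩
    obtain ⟨mks, plK, e4a, e4b⟩ := hstep4
    simp only [e4a, e4b]
    rfl

-- ===== VERDICT (by name: the statement is the Claim_ definition above) =====
theorem generate_itinerary_spec : Claim_equal_generate_itinerary := by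
  intro city places weather_data _ _
  exact pv_main city places weather_data
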